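-- pv_equiv track=rewrite | github.com/andrea-ci/copdata | detection.py | contours_to_boxes
-- ===== SOURCE A (Python) =====
-- def contours_to_boxes(contours):
--     """
--     Converts contours into boxes.
--     A box is a tuple given by x_min, x_max, ymin, ymax.
--     """
--
--     boxes = []
--     for cont in contours:
--
--         x_min = None
--         x_max = None
--         y_min = None
--         y_max = None
--
--         for pnt in cont:
--
--             x, y = pnt[0]
--
--             if x_min is None:
--                 x_min = x
--             else:
--                 x_min = min(x_min, x)
--
--             if x_max is None:
--                 x_max = x
--             else:
--                 x_max = max(x_max, x)
--
--             if y_min is None: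
--                 y_min = y
--             else:
--                 y_min = min(y_min, y)
--
--             if y_max is None:
--                 y_max = y
--             else:
--                 y_max = max(y_max, y)
--
--         boxes.append((x_min, y_min, x_max, y_max))
--
--     return boxes
-- ===== SOURCE B (Python) =====
-- def contours_to_boxes(contours):
--     """Converts contours into boxes (x_min, y_min, x_max, y_max) per contour,
--     by sorting each coordinate axis and picking the first/last element."""
--     boxes = []
--     for cont in contours:
--         xs = sorted(p[0][0] for p in cont)
--         ys = sorted(p[0][1] for p in cont)
--         boxes.append((xs[0], ys[0], xs[-1], ys[-1]))
--     return boxes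
-- ===== Notes on version B (the rewrite author's own statement) =====
-- stated objective: alternative
-- what changed: Replaces the single pass with four Optional running min/max accumulators by sorting each contour's x and y coordinate lists and reading the extremes off the ends of the sorted lists (sort-then-pick instead of scan-and-compare).
-- outside the precondition, e.g. on contours_to_boxes([[]]): A returns [(None, None, None, None)], B raises IndexError; on contours_to_boxes([[[[1, 2, 3]]]]): A raises ValueError, B returns [(1, 2, 1, 2)]
import Mathlib
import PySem

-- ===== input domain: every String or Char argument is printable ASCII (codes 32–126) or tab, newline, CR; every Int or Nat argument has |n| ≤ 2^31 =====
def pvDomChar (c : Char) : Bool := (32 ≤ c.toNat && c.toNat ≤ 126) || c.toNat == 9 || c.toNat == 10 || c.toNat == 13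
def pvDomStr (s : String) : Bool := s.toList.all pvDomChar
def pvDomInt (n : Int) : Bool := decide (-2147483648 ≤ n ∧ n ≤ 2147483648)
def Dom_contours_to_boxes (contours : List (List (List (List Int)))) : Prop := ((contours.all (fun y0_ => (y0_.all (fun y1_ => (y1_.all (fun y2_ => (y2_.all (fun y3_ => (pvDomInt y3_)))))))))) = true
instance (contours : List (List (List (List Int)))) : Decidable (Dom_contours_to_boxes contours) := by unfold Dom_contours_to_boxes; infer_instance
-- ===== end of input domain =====

-- ===== PORT A =====
-- B sorts each coordinate axis and picks the ends instead of A's running Optional min/max accumulators; objective: alternative.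
-- A's inner loop state (x_min, x_max, y_min, y_max), all Optional.  Where Python raises
-- (pnt empty or pnt[0] not exactly a pair) the fold keeps the state; those inputs are outside Pre_.
def pvStepA (acc : Option Int × Option Int × Option Int × Option Int) (pnt : List (List Int)) :
    Option Int × Option Int × Option Int × Option Int :=
  match PySem.List.pyGet? pnt 0 with
  | some [x, y] =>
      let (xm, xM, ym, yM) := acc
      ((match xm with | none => some x | some v => some (min v x)),
       (match xM with | none => some x | some v => some (max v x)),
       (match ym with | none => some y | some v => some (min v y)),
       (match yM with | none => some y | some v => some (max v y)))
  | _ => acc  -- Python raises here (IndexError/ValueError); outside Pre_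

-- one contour: run the inner loop, append (x_min, y_min, x_max, y_max);
-- on an empty contour A appends Nones (not Int values) — outside Pre_, default (0,0,0,0) here.
def pvBoxA (cont : List (List (List Int))) : Int × Int × Int × Int :=
  match cont.foldl pvStepA (none, none, none, none) with
  | (some a, some b, some c, some d) => (a, c, b, d)
  | _ => (0, 0, 0, 0)

def contours_to_boxes (contours : List (List (List (List Int)))) : List (Int × Int × Int × Int) :=
  contours.map pvBoxA

-- ===== PORT B =====
-- p[0][0] / p[0][1]; the .getD defaults are only reached where Python B raises (outside Pre_)
def pvFx (p : List (List Int)) : Int := (PySem.List.pyGet? ((PySem.List.pyGet? p 0).getD []) 0).getD 0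
def pvFy (p : List (List Int)) : Int := (PySem.List.pyGet? ((PySem.List.pyGet? p 0).getD []) 1).getD 0

-- xs = sorted(...); ys = sorted(...); (xs[0], ys[0], xs[-1], ys[-1]).
-- The .getD 0 defaults are only reached on an empty contour, where Python B raises IndexError (outside Pre_).
def pvBoxB (cont : List (List (List Int))) : Int × Int × Int × Int :=
  let xs := PySem.List.sorted (cont.map pvFx) (fun v => v) false
  let ys := PySem.List.sorted (cont.map pvFy) (fun v => v) false
  ((PySem.List.pyGet? xs 0).getD 0, (PySem.List.pyGet? ys 0).getD 0,
   (PySem.List.pyGet? xs (-1)).getD 0, (PySem.List.pyGet? ys (-1)).getD 0)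

def contours_to_boxes_alt (contours : List (List (List (List Int)))) : List (Int × Int × Int × Int) :=
  contours.map pvBoxB

-- ===== PRECONDITION & SPEC =====
-- Pre_ excludes exactly where Python A does not return an Int 4-tuple: an empty contour (A appends
-- a tuple of Nones, not ints) and a point whose pnt[0] is missing or not exactly a pair (A raises).
def Pre_contours_to_boxes (contours : List (List (List (List Int)))) : Prop :=
  ∀ cont ∈ contours, cont ≠ [] ∧ ∀ p ∈ cont, p ≠ [] ∧ p.headI.length = 2
instance (contours : List (List (List (List Int)))) : Decidable (Pre_contours_to_boxes contours) := by
  unfold Pre_contours_to_boxes; infer_instance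
def pvWitness_contours_to_boxes : List (List (List (List Int))) :=
  [[[[1, 2]], [[0, 5]], [[3, -1]]], [[[7, 7]]]]
def Spec_contours_to_boxes (contours : List (List (List (List Int)))) (out : List (Int × Int × Int × Int)) : Prop := out = contours_to_boxes_alt contours
instance (contours : List (List (List (List Int)))) (out : List (Int × Int × Int × Int)) : Decidable (Spec_contours_to_boxes contours out) := by unfold Spec_contours_to_boxes; infer_instance

-- ===== CLAIM (what is proved, stated in full; the proofs are below) =====
def Claim_equal_contours_to_boxes : Prop := ∀ (contours : List (List (List (List Int)))), Dom_contours_to_boxes contours → Pre_contours_to_boxes contours → Spec_contours_to_boxes contours (contours_to_boxes contours)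

-- ===== LEMMAS AND PROOFS =====

-- a valid point p yields pnt[0] = [pvFx p, pvFy p]
lemma pvGet0_valid (p : List (List Int)) (hp : p ≠ []) (hl : p.headI.length = 2) :
    PySem.List.pyGet? p 0 = some [pvFx p, pvFy p] := by
  match p, hp with
  | q :: _, _ =>
    match q, hl with
    | [x, y], _ => simp [pvFx, pvFy, PySem.List.pyGet?, PySem.List.pyIdx?]

-- A's inner loop from an all-some state = per-axis min/max folds over the coordinate lists
lemma pvFoldA_some (rest : List (List (List Int)))
    (h : ∀ p ∈ rest, p ≠ [] ∧ p.headI.length = 2) (a b c d : Int) :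
    rest.foldl pvStepA (some a, some b, some c, some d)
      = (some ((rest.map pvFx).foldl min a), some ((rest.map pvFx).foldl max b),
         some ((rest.map pvFy).foldl min c), some ((rest.map pvFy).foldl max d)) := by
  induction rest generalizing a b c d with
  | nil => simp
  | cons p t ih =>
    have hp := h p (by simp)
    have ht : ∀ q ∈ t, q ≠ [] ∧ q.headI.length = 2 := fun q hq => h q (by simp [hq])
    simp only [List.foldl_cons, List.map_cons, pvStepA, pvGet0_valid p hp.1 hp.2]
    exact ih ht _ _ _ _

-- the min-fold is a member of x :: rest and a lower bound of it (dually for max)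
lemma pvFoldMin_mem (x : Int) (rest : List Int) : rest.foldl min x ∈ x :: rest := by
  induction rest generalizing x with
  | nil => simp
  | cons y t ih =>
    simp only [List.foldl_cons]
    rcases List.mem_cons.1 (ih (min x y)) with h | h
    · rcases min_choice x y with hm | hm <;> rw [hm] at h ⊢ <;> simp [h]
    · simp [h]

lemma pvFoldMin_le_init (rest : List Int) : ∀ x : Int, rest.foldl min x ≤ x := by
  induction rest with
  | nil => intro x; simp
  | cons y t ih =>
    intro x
    exact le_trans (ih (min x y)) (min_le_left x y)

lemma pvFoldMin_le_mem (rest : List Int) : ∀ (x y : Int), y ∈ rest → rest.foldl min x ≤ y := by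
  induction rest with
  | nil => simp
  | cons z t ih =>
    intro x y hy
    rcases List.mem_cons.1 hy with h | h
    · subst h
      exact le_trans (pvFoldMin_le_init t (min x y)) (min_le_right x y)
    · exact ih (min x z) y h

lemma pvFoldMin_le (x : Int) (rest : List Int) : ∀ y ∈ x :: rest, rest.foldl min x ≤ y := by
  intro y hy
  rcases List.mem_cons.1 hy with h | h
  · subst h; exact pvFoldMin_le_init rest y
  · exact pvFoldMin_le_mem rest x y h

lemma pvFoldMax_mem (x : Int) (rest : List Int) : rest.foldl max x ∈ x :: rest := by
  induction rest generalizing x with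
  | nil => simp
  | cons y t ih =>
    simp only [List.foldl_cons]
    rcases List.mem_cons.1 (ih (max x y)) with h | h
    · rcases max_choice x y with hm | hm <;> rw [hm] at h ⊢ <;> simp [h]
    · simp [h]

lemma pvFoldMax_ge_init (rest : List Int) : ∀ x : Int, x ≤ rest.foldl max x := by
  induction rest with
  | nil => intro x; simp
  | cons y t ih =>
    intro x
    exact le_trans (le_max_left x y) (ih (max x y))

lemma pvFoldMax_ge_mem (rest : List Int) : ∀ (x y : Int), y ∈ rest → y ≤ rest.foldl max x := by
  induction rest with
  | nil => simp
  | cons z t ih =>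
    intro x y hy
    rcases List.mem_cons.1 hy with h | h
    · subst h
      exact le_trans (le_max_right x y) (pvFoldMax_ge_init t (max x y))
    · exact ih (max x z) y h

lemma pvFoldMax_ge (x : Int) (rest : List Int) : ∀ y ∈ x :: rest, y ≤ rest.foldl max x := by
  intro y hy
  rcases List.mem_cons.1 hy with h | h
  · subst h; exact pvFoldMax_ge_init rest y
  · exact pvFoldMax_ge_mem rest x y h

-- in a Pairwise (≤) list the last element is an upper bound
lemma pvLast_ge_of_pairwise (l : List Int) (hl : l.Pairwise (· ≤ ·)) (h : l ≠ []) :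
    ∀ y ∈ l, y ≤ l.getLast h := by
  induction l with
  | nil => simp at h
  | cons a t ih =>
    intro y hy
    cases t with
    | nil => simp at hy; simp [hy]
    | cons b u =>
      rcases List.mem_cons.1 hy with h' | h'
      · subst h'
        have hle : ∀ z ∈ b :: u, y ≤ z := (List.pairwise_cons.1 hl).1
        calc y ≤ (b :: u).getLast (by simp) :=
              hle _ (List.getLast_mem _)
          _ = (y :: b :: u).getLast h := (List.getLast_cons (by simp)).symm
      · have := ih (List.pairwise_cons.1 hl).2 (by simp) y h'
        simpa [List.getLast_cons] using this

-- head of sorted(x :: rest) is the min-fold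
lemma pvSortedHead (x : Int) (rest : List Int) :
    (PySem.List.pyGet? (PySem.List.sorted (x :: rest) (fun v => v) false) 0).getD 0
      = rest.foldl min x := by
  have hperm := PySem.List.sorted_perm (x :: rest) (fun v : Int => v) false
  have hne : PySem.List.sorted (x :: rest) (fun v : Int => v) false ≠ [] := by
    intro hnil; have := hperm.length_eq; simp [hnil] at this
  obtain ⟨m, t, hmt⟩ := List.exists_cons_of_ne_nil hne
  have hmem : m ∈ x :: rest := (hperm.mem_iff).1 (by simp [hmt])
  have hlow : ∀ y ∈ x :: rest, m ≤ y := PySem.List.key_head_sorted_le _ _ hmt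
  have heq : m = rest.foldl min x :=
    le_antisymm (hlow _ (pvFoldMin_mem x rest)) (pvFoldMin_le x rest m hmem)
  simp [hmt, PySem.List.pyGet?, PySem.List.pyIdx?, heq]

-- last of sorted(x :: rest) is the max-fold
lemma pvSortedLast (x : Int) (rest : List Int) :
    (PySem.List.pyGet? (PySem.List.sorted (x :: rest) (fun v => v) false) (-1)).getD 0
      = rest.foldl max x := by
  have hperm := PySem.List.sorted_perm (x :: rest) (fun v : Int => v) false
  have hne : PySem.List.sorted (x :: rest) (fun v : Int => v) false ≠ [] := by
    intro hnil; have := hperm.length_eq; simp [hnil] at this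
  have hpw : (PySem.List.sorted (x :: rest) (fun v : Int => v) false).Pairwise (· ≤ ·) := by
    simpa using PySem.List.sorted_pairwise (x :: rest) (fun v : Int => v)
  set s := PySem.List.sorted (x :: rest) (fun v : Int => v) false with hs
  have hlastmem : s.getLast hne ∈ x :: rest := (hperm.mem_iff).1 (List.getLast_mem hne)
  have hfmem : rest.foldl max x ∈ s := (hperm.mem_iff).2 (pvFoldMax_mem x rest)
  have heq : s.getLast hne = rest.foldl max x :=
    le_antisymm (pvFoldMax_ge x rest _ hlastmem) (pvLast_ge_of_pairwise s hpw hne _ hfmem)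
  rw [PySem.List.pyGet?_neg_one, List.getLast?_eq_some_getLast hne]
  simp [heq]

lemma pvBox_eq (cont : List (List (List Int))) (hne : cont ≠ [])
    (h : ∀ p ∈ cont, p ≠ [] ∧ p.headI.length = 2) : pvBoxA cont = pvBoxB cont := by
  match cont, hne with
  | p :: t, _ =>
    have hp := h p (by simp)
    have ht : ∀ q ∈ t, q ≠ [] ∧ q.headI.length = 2 := fun q hq => h q (by simp [hq])
    simp only [pvBoxA, List.foldl_cons, pvStepA, pvGet0_valid p hp.1 hp.2,
      pvFoldA_some t ht, pvBoxB, List.map_cons,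
      pvSortedHead, pvSortedLast]

-- ===== VERDICT (by name: the statement is the Claim_ definition above) =====
theorem contours_to_boxes_spec : Claim_equal_contours_to_boxes := by
  intro contours _ hpre
  unfold Spec_contours_to_boxes contours_to_boxes contours_to_boxes_alt
  exact List.map_congr_left fun cont hc => pvBox_eq cont (hpre cont hc).1 (hpre cont hc).2
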